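-- pv_equiv track=rewrite | github.com/mravaloarison/soulkeeper | personality.py | user_personality
-- ===== SOURCE A (Python) =====
-- personality_tests = {
--     "questions": [
--         {
--             "question": "When planning a vacation, you prefer to:",
--             "options": {
--                 "a": "Relax on a beach with a good book.",
--                 "b": "Explore a bustling city with lots of culture.",
--                 "c": "Go on an adventurous hiking or camping trip.",
--                 "d": "Visit historical sites and museums."
--             }
--         },
--         {
--             "question": "What's your favorite way to spend a Saturday evening?",
--             "options": {
--                 "a": "Hosting a dinner party with friends.",
--                 "b": "Going to a live concert or theater show.",
--                 "c": "Trying out a new extreme sport or outdoor activity.",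
--                 "d": "Watching a documentary or reading a non-fiction book."
--             }
--         },
--         {
--             "question": "Which of the following words best describes you?",
--             "options": {
--                 "a": "Social",
--                 "b": "Creative",
--                 "c": "Adventurous",
--                 "d": "Intellectual"
--             }
--         },
--         {
--             "question": "Your ideal job would involve:",
--             "options": {
--                 "a": "Working with people and helping them.",
--                 "b": "Expressing your creativity and imagination.",
--                 "c": "Being physically active and outdoors.",
--                 "d": "Researching and analyzing data."
--             }
--         },
--         {
--             "question": "In your free time, you enjoy:",
--             "options": {
--                 "a": "Cooking and trying new recipes.",
--                 "b": "Painting, writing, or making music.",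
--                 "c": "Playing sports or engaging in physical activities.",
--                 "d": "Solving puzzles and playing strategic games."
--             }
--         }
--     ],
--     "scoring": {
--         "a": 1,
--         "b": 2,
--         "c": 3,
--         "d": 4
--     },
--     "results": {
--         "5-8": "Social",
--         "9-12": "Creative",
--         "13-16": "Adventurous",
--         "17-20": "Intellectual"
--     }
-- }
--
-- def user_personality(score):
--     score = int(score)
--     results = personality_tests["results"]
--     for key, value in results.items():
--         min_score, max_score = map(int, key.split('-'))
--         if min_score <= (score) <= max_score:
--             return value
--     return None
-- ===== SOURCE B (Python) =====
-- def user_personality(score):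
--     score = int(score)
--     if 5 <= score <= 20:
--         return ["Social", "Creative", "Adventurous", "Intellectual"][(score - 5) // 4]
--     return None
-- ===== Notes on version B (the rewrite author's own statement) =====
-- stated objective: simpler
-- what changed: Replaces the loop over the string-keyed ranges dict (splitting and parsing each dashed key) with a range guard and a closed-form arithmetic index into the four labels.
import Mathlib
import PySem

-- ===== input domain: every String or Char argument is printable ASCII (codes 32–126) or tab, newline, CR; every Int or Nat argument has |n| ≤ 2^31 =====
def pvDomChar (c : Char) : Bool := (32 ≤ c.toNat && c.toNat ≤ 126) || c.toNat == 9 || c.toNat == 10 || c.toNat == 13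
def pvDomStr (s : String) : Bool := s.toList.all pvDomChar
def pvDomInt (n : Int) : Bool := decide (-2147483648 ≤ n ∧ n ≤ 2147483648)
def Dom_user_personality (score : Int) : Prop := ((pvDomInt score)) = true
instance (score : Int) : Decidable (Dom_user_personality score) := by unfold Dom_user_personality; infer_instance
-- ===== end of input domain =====

-- B replaces A's loop over string-keyed ranges with a guard and a closed-form index (simpler).

-- ===== PORT A =====
-- the literal "results" dict of the module, in insertion order
def pvResults : List (String × String) :=
  [("5-8", "Social"), ("9-12", "Creative"), ("13-16", "Adventurous"), ("17-20", "Intellectual")]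

-- min_score, max_score = map(int, key.split('-'))  (keys are module literals, always parse)
def pvParseRange (key : String) : Int × Int :=
  match PySem.Str.split? key "-" with
  | some [a, b] => ((PySem.Int.ofStr? a).getD 0, (PySem.Int.ofStr? b).getD 0)
  | _ => (0, 0)

def pvScanA (score : Int) : List (String × String) → Option String
  | [] => none
  | (k, v) :: rest =>
      let r := pvParseRange k
      if r.1 ≤ score ∧ score ≤ r.2 then some v else pvScanA score rest

def user_personality (score : Int) : Option String := pvScanA score pvResults

-- ===== PORT B =====
def user_personality_alt (score : Int) : Option String :=
  if 5 ≤ score ∧ score ≤ 20 then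
    PySem.List.pyGet? ["Social", "Creative", "Adventurous", "Intellectual"]
      (PySem.Int.floordiv (score - 5) 4)
  else none

-- ===== PRECONDITION & SPEC =====
def Spec_user_personality (score : Int) (out : Option String) : Prop := out = user_personality_alt score
instance (score : Int) (out : Option String) : Decidable (Spec_user_personality score out) := by unfold Spec_user_personality; infer_instance

-- ===== CLAIM (what is proved, stated in full; the proofs are below) =====
def Claim_equal_user_personality : Prop := ∀ (score : Int), Dom_user_personality score → Spec_user_personality score (user_personality score)

-- ===== LEMMAS AND PROOFS =====
theorem pvParse1 : pvParseRange "5-8" = (5, 8) := by decide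
theorem pvParse2 : pvParseRange "9-12" = (9, 12) := by decide
theorem pvParse3 : pvParseRange "13-16" = (13, 16) := by decide
theorem pvParse4 : pvParseRange "17-20" = (17, 20) := by decide

-- ===== VERDICT (by name: the statement is the Claim_ definition above) =====
theorem user_personality_spec : Claim_equal_user_personality := by
  intro s _
  unfold Spec_user_personality user_personality user_personality_alt pvResults
  simp only [pvScanA, pvParse1, pvParse2, pvParse3, pvParse4]
  by_cases h1 : 5 ≤ s ∧ s ≤ 8
  · have hf : (s - 5) / 4 = 0 := by omega
    simp [h1, hf, PySem.List.pyGet?, PySem.List.pyIdx?]; omega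
  · by_cases h2 : 9 ≤ s ∧ s ≤ 12
    · have hf : (s - 5) / 4 = 1 := by omega
      simp [h1, h2, hf, PySem.List.pyGet?, PySem.List.pyIdx?]; omega
    · by_cases h3 : 13 ≤ s ∧ s ≤ 16
      · have hf : (s - 5) / 4 = 2 := by omega
        simp [h1, h2, h3, hf, PySem.List.pyGet?, PySem.List.pyIdx?]; omega
      · by_cases h4 : 17 ≤ s ∧ s ≤ 20
        · have hf : (s - 5) / 4 = 3 := by omega
          simp [h1, h2, h3, h4, hf, PySem.List.pyGet?, PySem.List.pyIdx?]; omega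
        · have hout : ¬ (5 ≤ s ∧ s ≤ 20) := by omega
          simp [h1, h2, h3, h4, hout]
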